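-- pv_equiv track=rewrite | github.com/MrrrrFox/Python | JezykPython ~ ProgrammingInPython/lab06.py | gen_5
-- ===== SOURCE A (Python) =====
-- def gen_5(seq):
-- 	ilosc = 0
-- 	pierwsze_1 = 0
-- 	for i in seq:
-- 		if i == 1 and pierwsze_1 == 0:
-- 			pierwsze_1 = 1
-- 			ilosc = 0
-- 		elif i==1:
-- 			yield ilosc
-- 			ilosc = 0
-- 		else:
-- 			ilosc = ilosc + 1
-- ===== SOURCE B (Python) =====
-- def gen_5(seq):
--     last = None
--     for idx, x in enumerate(seq):
--         if x == 1:
--             if last is not None: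
--                 yield idx - last - 1
--             last = idx
-- ===== Notes on version B (the rewrite author's own statement) =====
-- stated objective: alternative
-- what changed: B replaces A's running non-1 counter and first-1 flag with the index of the last seen 1, computing each gap as idx - last - 1 via enumerate.
import Mathlib
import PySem

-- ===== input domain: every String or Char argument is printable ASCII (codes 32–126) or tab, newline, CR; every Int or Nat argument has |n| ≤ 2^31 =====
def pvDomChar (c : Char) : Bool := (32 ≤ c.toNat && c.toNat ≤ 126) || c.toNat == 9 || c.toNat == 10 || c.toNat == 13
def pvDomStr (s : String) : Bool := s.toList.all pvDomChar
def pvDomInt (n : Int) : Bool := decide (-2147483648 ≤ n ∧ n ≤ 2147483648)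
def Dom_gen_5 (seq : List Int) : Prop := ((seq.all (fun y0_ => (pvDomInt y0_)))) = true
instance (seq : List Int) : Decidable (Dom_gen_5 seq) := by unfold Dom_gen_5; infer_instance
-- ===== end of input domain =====

-- B tracks the index of the last 1 (gap = idx - last - 1) instead of A's non-1 counter with a first-1 flag; same cost, different decomposition.

-- ===== PORT A =====
-- loop over seq with state (ilosc, pierwsze_1); yield = cons
def gen5Loop : List Int → Int → Int → List Int
  | [], _, _ => []
  | i :: rest, ilosc, pierwsze_1 =>
    if i == 1 && pierwsze_1 == 0 then gen5Loop rest 0 1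
    else if i == 1 then ilosc :: gen5Loop rest 0 pierwsze_1
    else gen5Loop rest (ilosc + 1) pierwsze_1

def gen_5 (seq : List Int) : List Int := gen5Loop seq 0 0

-- ===== PORT B =====
-- enumerate with state last : Option Int (index of the last seen 1)
def gen5AltLoop : List Int → Int → Option Int → List Int
  | [], _, _ => []
  | x :: rest, idx, last =>
    if x == 1 then
      match last with
      | some l => (idx - l - 1) :: gen5AltLoop rest (idx + 1) (some idx)
      | none => gen5AltLoop rest (idx + 1) (some idx)
    else gen5AltLoop rest (idx + 1) last

def gen_5_alt (seq : List Int) : List Int := gen5AltLoop seq 0 none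

-- ===== PRECONDITION & SPEC =====
def Spec_gen_5 (seq : List Int) (out : List Int) : Prop := out = gen_5_alt seq
instance (seq : List Int) (out : List Int) : Decidable (Spec_gen_5 seq out) := by unfold Spec_gen_5; infer_instance

-- ===== CLAIM (what is proved, stated in full; the proofs are below) =====
def Claim_equal_gen_5 : Prop := ∀ (seq : List Int), Dom_gen_5 seq → Spec_gen_5 seq (gen_5 seq)

-- ===== LEMMAS AND PROOFS =====
-- invariant after the first 1: A's counter equals idx - l - 1 where l is the index of the last 1
theorem gen5_some (seq : List Int) : ∀ (idx l : Int),
    gen5Loop seq (idx - l - 1) 1 = gen5AltLoop seq idx (some l) := by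
  induction seq with
  | nil => intro idx l; rfl
  | cons x rest ih =>
    intro idx l
    by_cases hx : x = 1
    · have h := ih (idx + 1) idx
      rw [show idx + 1 - idx - 1 = (0 : Int) by ring] at h
      simp [gen5Loop, gen5AltLoop, hx, h]
    · have h := ih (idx + 1) l
      rw [show idx + 1 - l - 1 = idx - l by ring] at h
      simp [gen5Loop, gen5AltLoop, hx, h]

-- before the first 1, A's counter value is irrelevant
theorem gen5_none (seq : List Int) : ∀ (ilosc idx : Int),
    gen5Loop seq ilosc 0 = gen5AltLoop seq idx none := by
  induction seq with
  | nil => intro _ _; rfl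
  | cons x rest ih =>
    intro ilosc idx
    by_cases hx : x = 1
    · have h := gen5_some rest (idx + 1) idx
      rw [show idx + 1 - idx - 1 = (0 : Int) by ring] at h
      simp [gen5Loop, gen5AltLoop, hx, h]
    · simp [gen5Loop, gen5AltLoop, hx, ih (ilosc + 1) (idx + 1)]

-- ===== VERDICT (by name: the statement is the Claim_ definition above) =====
theorem gen_5_spec : Claim_equal_gen_5 := by
  intro seq _
  unfold Spec_gen_5 gen_5 gen_5_alt
  exact gen5_none seq 0 0
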